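-- pv_equiv track=rewrite | github.com/waynelaizye/Risk-Analysis-on-Taiwanese-Companies | src/crawl_stock_new.py | get_dates_id
-- ===== SOURCE A (Python) =====
-- d1 = '2018/10/01'
--
-- d2 = '2019/12/31'
--
-- def get_dates_id(data):
--     for i in range(len(data[0])):
--         if data[0][i] >= d1:
--             i1 = i
--             break
--
--     for i in range(len(data[0])):
--         if data[0][i] > d2:
--             i2 = i-1
--             break
--     return i1, i2
-- ===== SOURCE B (Python) =====
-- d1 = '2018/10/01'
--
-- d2 = '2019/12/31'
--
-- def get_dates_id(data):
--     row = data[0]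
--     found = False
--     for i in range(len(row)):
--         if not found and row[i] >= d1:
--             i1 = i
--             found = True
--         if row[i] > d2:
--             i2 = i - 1
--             break
--     return i1, i2
-- ===== Notes on version B (the rewrite author's own statement) =====
-- stated objective: alternative
-- what changed: Replaces A's two independent scans of data[0] with a single loop that maintains a found-flag for i1 and breaks when the i2 bound is crossed; correctness uses that any date > d2 is also >= d1.
import Mathlib
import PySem

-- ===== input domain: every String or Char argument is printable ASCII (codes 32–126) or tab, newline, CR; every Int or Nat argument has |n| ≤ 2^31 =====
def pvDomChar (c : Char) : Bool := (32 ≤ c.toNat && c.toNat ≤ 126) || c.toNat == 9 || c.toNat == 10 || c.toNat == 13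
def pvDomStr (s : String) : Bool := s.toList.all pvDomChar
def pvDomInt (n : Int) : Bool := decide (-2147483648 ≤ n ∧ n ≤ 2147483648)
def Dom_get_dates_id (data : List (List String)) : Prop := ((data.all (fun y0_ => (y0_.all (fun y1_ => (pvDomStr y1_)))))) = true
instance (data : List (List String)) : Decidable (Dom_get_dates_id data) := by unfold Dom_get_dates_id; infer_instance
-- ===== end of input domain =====

-- B merges A's two scans into one early-exit loop with a found-flag (alternative decomposition, same results).
-- Both Pythons raise (IndexError/UnboundLocalError) outside Pre_; the ports return [] there.

-- ===== PORT A =====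
-- Python str comparison = code-point lexicographic = Lean's order on .toList (PYSEM.md: exact)
def pvAD1 : List Char := "2018/10/01".toList
def pvAD2 : List Char := "2019/12/31".toList
-- first loop of A: first index i (counting from the accumulator) with row[i] >= d1
def pvFindGE (row : List String) (i : Int) : Option Int :=
  match row with
  | [] => none
  | x :: rest => if pvAD1 ≤ x.toList then some i else pvFindGE rest (i + 1)

-- second loop of A: i-1 for the first index i with row[i] > d2
def pvFindGT (row : List String) (i : Int) : Option Int :=
  match row with
  | [] => none
  | x :: rest => if pvAD2 < x.toList then some (i - 1) else pvFindGT rest (i + 1)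

def get_dates_id (data : List (List String)) : List Int :=
  let row := data.headD []
  match pvFindGE row 0, pvFindGT row 0 with
  | some a, some b => [a, b]
  | _, _ => []

-- ===== PORT B =====
def pvBD1 : List Char := "2018/10/01".toList
def pvBD2 : List Char := "2019/12/31".toList
-- B's single loop: i1 carries the found-flag (some = found); break on x > d2 returns both.
def pvScan (row : List String) (i : Int) (i1 : Option Int) : Option Int × Option Int :=
  match row with
  | [] => (i1, none)
  | x :: rest =>
    let i1' := match i1 with
      | some a => some a
      | none => if pvBD1 ≤ x.toList then some i else none
    if pvBD2 < x.toList then (i1', some (i - 1))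
    else pvScan rest (i + 1) i1'

def get_dates_id_alt (data : List (List String)) : List Int :=
  let row := data.headD []
  match pvScan row 0 none with
  | (i1, i2) =>
    match i1 with
    | none => []
    | some a =>
      match i2 with
      | none => []
      | some b => [a, b]

-- ===== PRECONDITION & SPEC =====
-- Pre_ excludes exactly the inputs where Python A raises: empty data (IndexError) or no date
-- >= d1 / > d2 in data[0] (UnboundLocalError); B raises the same exceptions there.
def Pre_get_dates_id (data : List (List String)) : Prop :=
  data ≠ [] ∧ (∃ x ∈ data.headD [], "2018/10/01".toList ≤ x.toList) ∧ (∃ x ∈ data.headD [], "2019/12/31".toList < x.toList)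
instance (data : List (List String)) : Decidable (Pre_get_dates_id data) := by
  unfold Pre_get_dates_id; infer_instance

def pvWitness_get_dates_id : List (List String) := [["2018/01/01", "2018/11/11", "2020/01/01"]]

def Spec_get_dates_id (data : List (List String)) (out : List Int) : Prop := out = get_dates_id_alt data
instance (data : List (List String)) (out : List Int) : Decidable (Spec_get_dates_id data out) := by unfold Spec_get_dates_id; infer_instance

-- ===== CLAIM (what is proved, stated in full; the proofs are below) =====
def Claim_equal_get_dates_id : Prop := ∀ (data : List (List String)), Dom_get_dates_id data → Pre_get_dates_id data → Spec_get_dates_id data (get_dates_id data)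

-- ===== LEMMAS AND PROOFS =====

-- B's one-pass scan computes exactly the pair of A's two scans: on a break at x > d2 we also
-- have d1 <= x, so the first >=-d1 index over the whole row is reached by the merged loop.
theorem pvScan_eq (row : List String) : ∀ (i : Int) (i1 : Option Int),
    pvScan row i i1
      = ((match i1 with | some a => some a | none => pvFindGE row i), pvFindGT row i) := by
  have e1 : pvAD1 = pvBD1 := rfl
  have e2 : pvAD2 = pvBD2 := rfl
  induction row with
  | nil => intro i i1; cases i1 <;> rfl
  | cons x rest ih =>
    intro i i1
    simp only [pvScan, pvFindGE, pvFindGT, e1, e2]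
    by_cases h2 : pvBD2 < x.toList
    · have h1 : pvBD1 ≤ x.toList := le_trans (by decide : pvBD1 ≤ pvBD2) (le_of_lt h2)
      cases i1 <;> simp [h2, h1]
    · cases i1 with
      | some a => simp [h2, ih]
      | none =>
        by_cases h1 : pvBD1 ≤ x.toList <;> simp [h1, h2, ih]

-- ===== VERDICT (by name: the statement is the Claim_ definition above) =====
theorem get_dates_id_spec : Claim_equal_get_dates_id := by
  intro data _ _
  unfold Spec_get_dates_id get_dates_id get_dates_id_alt
  simp only [pvScan_eq]
  cases pvFindGE (data.headD []) 0 <;> cases pvFindGT (data.headD []) 0 <;> rfl
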